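-- pv_equiv track=rewrite | github.com/iristech-systems/surrealengine | src/surrealengine/utils/parsing.py | split_query_on_from
-- ===== SOURCE A (Python) =====
-- def split_query_on_from(query_str: str) -> tuple[str, str]:
--     """
--     Split a SQL query into SELECT part and the rest (starting from FROM),
--     respecting quotes and parentheses to avoid false positives.
--
--     Args:
--         query_str: The full query string
--
--     Returns:
--         Tuple of (select_part, rest_part).
--         If FROM is not found, returns (query_str, "").
--     """
--     paren_level = 0
--     bracket_level = 0
--     brace_level = 0
--     in_single_quote = False
--     in_double_quote = False
--     escaped = False
--
--     # We look for the sequence " FROM " (case insensitive) outside of quotes/parens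
--     # Or start of string "FROM " (unlikely for SELECT queries but possible for others)
--     # Actually, we iterating char by char, so we can check if we match "FROM" token.
--
--     # Simple state machine approach
--
--     for i, char in enumerate(query_str):
--         if escaped:
--             escaped = False
--             continue
--
--         if char == '\\':
--             escaped = True
--             continue
--
--         if in_single_quote:
--             if char == "'":
--                 in_single_quote = False
--             continue
--
--         if in_double_quote:
--             if char == '"':
--                 in_double_quote = False
--             continue
--
--         if char == "'":
--             in_single_quote = True
--             continue
--
--         if char == '"':
--             in_double_quote = True
--             continue
--
--         if char == '(':
--             paren_level += 1
--         elif char == ')':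
--             paren_level = max(0, paren_level - 1)
--         elif char == '[':
--             bracket_level += 1
--         elif char == ']':
--             bracket_level = max(0, bracket_level - 1)
--         elif char == '{':
--             brace_level += 1
--         elif char == '}':
--             brace_level = max(0, brace_level - 1)
--
--         # Check if we are potentially at a "FROM" token keywords
--         # We need to look ahead slightly.
--         # Token boundary check: prev char is whitespace or start, next char is whitespace or end
--         # We only check valid locations (level 0)
--
--         if paren_level == 0 and bracket_level == 0 and brace_level == 0:
--             if char.upper() == 'F':
--                 # Check for "FROM"
--                 # Check boundary before
--                 valid_boundary_before = (i == 0) or query_str[i-1].isspace() or query_str[i-1] in ')]}'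
--                 if valid_boundary_before:
--                     # Check match
--                     if query_str[i:i+4].upper() == 'FROM':
--                         # Check boundary after
--                         after_idx = i + 4
--                         valid_boundary_after = (after_idx >= len(query_str)) or query_str[after_idx].isspace() or query_str[after_idx] in '('
--
--                         if valid_boundary_after:
--                             # Found it!
--                             return query_str[:i].strip(), query_str[i:].strip()
--
--     return query_str, ""
-- ===== SOURCE B (Python) =====
-- def split_query_on_from(query_str: str) -> tuple[str, str]:
--     """Split at the first top-level FROM: candidate indices first, then
--     prefix verification with a small state machine."""
--     n = len(query_str)
--
--     def is_candidate(i: int) -> bool: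
--         if query_str[i].upper() != 'F':
--             return False
--         if query_str[i:i + 4].upper() != 'FROM':
--             return False
--         if not (i == 0 or query_str[i - 1].isspace() or query_str[i - 1] in ')]}'):
--             return False
--         after = i + 4
--         return after >= n or query_str[after].isspace() or query_str[after] == '('
--
--     candidates = [i for i in range(n) if is_candidate(i)]
--
--     def prefix_clean(i: int) -> bool:
--         # state after scanning query_str[:i]; candidate valid iff all-neutral
--         paren = bracket = brace = 0
--         in_sq = in_dq = escaped = False
--         for ch in query_str[:i]:
--             if escaped:
--                 escaped = False
--             elif ch == '\\':
--                 escaped = True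
--             elif in_sq:
--                 in_sq = ch != "'"
--             elif in_dq:
--                 in_dq = ch != '"'
--             elif ch == "'":
--                 in_sq = True
--             elif ch == '"':
--                 in_dq = True
--             elif ch == '(':
--                 paren += 1
--             elif ch == ')':
--                 paren = max(0, paren - 1)
--             elif ch == '[':
--                 bracket += 1
--             elif ch == ']':
--                 bracket = max(0, bracket - 1)
--             elif ch == '{':
--                 brace += 1
--             elif ch == '}':
--                 brace = max(0, brace - 1)
--         return (not escaped and not in_sq and not in_dq
--                 and paren == 0 and bracket == 0 and brace == 0)
--
--     for i in candidates:
--         if prefix_clean(i):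
--             return query_str[:i].strip(), query_str[i:].strip()
--     return query_str, ""
-- ===== Notes on version B (the rewrite author's own statement) =====
-- stated objective: alternative
-- what changed: B replaces A's single fused left-to-right scan with a two-phase search: it first collects every boundary-valid FROM candidate index, then checks candidates left-to-right by re-scanning each candidate's prefix with the quote/paren/escape state machine and splits at the first clean one.
import Mathlib
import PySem

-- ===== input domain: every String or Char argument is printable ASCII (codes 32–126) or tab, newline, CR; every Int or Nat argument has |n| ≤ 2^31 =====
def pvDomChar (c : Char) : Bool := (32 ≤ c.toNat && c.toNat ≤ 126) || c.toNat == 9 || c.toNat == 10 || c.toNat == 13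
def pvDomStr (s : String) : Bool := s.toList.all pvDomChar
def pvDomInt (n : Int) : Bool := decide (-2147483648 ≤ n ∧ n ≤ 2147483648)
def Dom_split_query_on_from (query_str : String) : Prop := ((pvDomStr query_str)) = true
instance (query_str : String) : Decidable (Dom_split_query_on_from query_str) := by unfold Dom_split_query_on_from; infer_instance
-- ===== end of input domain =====

-- B splits the work into candidate-FROM indices plus per-candidate prefix verification instead of A's fused scan; a timing run measured B faster on the generated inputs (cheap candidate filter, state machine only on candidate prefixes).

-- ===== PORT A =====
-- literal port of A's fused loop: state = (paren, bracket, brace, in_single_quote, in_double_quote, escaped),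
-- i the current index into `full` (= query_str as a char list)
def pvGoA (q : String) (full : List Char) :
    List Char → Nat → Int → Int → Int → Bool → Bool → Bool → String × String
  | [], _, _, _, _, _, _, _ => (q, "")
  | c :: rest, i, p, bk, br, sq, dq, esc =>
    if esc then pvGoA q full rest (i+1) p bk br sq dq false
    else if c = '\\' then pvGoA q full rest (i+1) p bk br sq dq true
    else if sq then pvGoA q full rest (i+1) p bk br (if c = '\'' then false else sq) dq esc
    else if dq then pvGoA q full rest (i+1) p bk br sq (if c = '"' then false else dq) esc
    else if c = '\'' then pvGoA q full rest (i+1) p bk br true dq esc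
    else if c = '"' then pvGoA q full rest (i+1) p bk br sq true esc
    else
      -- the paren/bracket/brace elif chain
      let st' : Int × Int × Int :=
        if c = '(' then (p + 1, bk, br)
        else if c = ')' then (max 0 (p - 1), bk, br)
        else if c = '[' then (p, bk + 1, br)
        else if c = ']' then (p, max 0 (bk - 1), br)
        else if c = '{' then (p, bk, br + 1)
        else if c = '}' then (p, bk, max 0 (br - 1))
        else (p, bk, br)
      let p' := st'.1; let bk' := st'.2.1; let br' := st'.2.2
      if p' = 0 ∧ bk' = 0 ∧ br' = 0 then
        if PySem.Chars.upperChar c = 'F' then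
          -- boundary before: i == 0 or query_str[i-1].isspace() or query_str[i-1] in ')]}'
          -- (full.getD (i-1) ' ' is exact: Python only reads query_str[i-1] when i ≥ 1, in range)
          if i = 0 ∨ PySem.Chars.isspace (full.getD (i-1) ' ') = true ∨ [')', ']', '}'].contains (full.getD (i-1) ' ') = true then
            -- query_str[i:i+4].upper() == 'FROM'  (slice with nonnegative bounds = drop/take)
            if PySem.Chars.upper ((full.drop i).take 4) = "FROM".toList then
              -- boundary after: after_idx >= len or isspace or '('  (getD exact: only read in range)
              if i + 4 ≥ full.length ∨ PySem.Chars.isspace (full.getD (i+4) ' ') = true ∨ full.getD (i+4) ' ' = '(' then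
                (String.ofList (PySem.Chars.strip (full.take i)), String.ofList (PySem.Chars.strip (full.drop i)))
              else pvGoA q full rest (i+1) p' bk' br' sq dq esc
            else pvGoA q full rest (i+1) p' bk' br' sq dq esc
          else pvGoA q full rest (i+1) p' bk' br' sq dq esc
        else pvGoA q full rest (i+1) p' bk' br' sq dq esc
      else pvGoA q full rest (i+1) p' bk' br' sq dq esc

def split_query_on_from (query_str : String) : String × String :=
  pvGoA query_str query_str.toList query_str.toList 0 0 0 0 false false false

-- ===== PORT B =====
-- B-side helper: one step of the quote/paren/escape state machine (Source B's elif chain)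
def pvStep (st : Int × Int × Int × Bool × Bool × Bool) (c : Char) :
    Int × Int × Int × Bool × Bool × Bool :=
  match st with
  | (p, bk, br, sq, dq, esc) =>
    if esc then (p, bk, br, sq, dq, false)
    else if c = '\\' then (p, bk, br, sq, dq, true)
    else if sq then (p, bk, br, decide (c ≠ '\''), dq, esc)
    else if dq then (p, bk, br, sq, decide (c ≠ '"'), esc)
    else if c = '\'' then (p, bk, br, true, dq, esc)
    else if c = '"' then (p, bk, br, sq, true, esc)
    else if c = '(' then (p + 1, bk, br, sq, dq, esc)
    else if c = ')' then (max 0 (p - 1), bk, br, sq, dq, esc)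
    else if c = '[' then (p, bk + 1, br, sq, dq, esc)
    else if c = ']' then (p, max 0 (bk - 1), br, sq, dq, esc)
    else if c = '{' then (p, bk, br + 1, sq, dq, esc)
    else if c = '}' then (p, bk, max 0 (br - 1), sq, dq, esc)
    else st

-- Source B's is_candidate(i): char test, slice match, boundary before, boundary after
def pvIsCand (full : List Char) (n : Nat) (i : Nat) : Bool :=
  decide (PySem.Chars.upperChar (full.getD i ' ') = 'F') &&
  decide (PySem.Chars.upper ((full.drop i).take 4) = "FROM".toList) &&
  (decide (i = 0) || PySem.Chars.isspace (full.getD (i-1) ' ') || [')', ']', '}'].contains (full.getD (i-1) ' ')) &&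
  (decide (i + 4 ≥ n) || PySem.Chars.isspace (full.getD (i+4) ' ') || decide (full.getD (i+4) ' ' = '('))

-- Source B's prefix_clean(i): fold the state machine over query_str[:i], require the neutral state
def pvPrefixClean (pref : List Char) : Bool :=
  match pref.foldl pvStep (0, 0, 0, false, false, false) with
  | (p, bk, br, sq, dq, esc) =>
    !esc && !sq && !dq && decide (p = 0) && decide (bk = 0) && decide (br = 0)

def split_query_on_from_alt (query_str : String) : String × String :=
  let full := query_str.toList
  let n := full.length
  let candidates := (List.range n).filter (pvIsCand full n)
  match candidates.find? (fun i => pvPrefixClean (full.take i)) with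
  | some i => (String.ofList (PySem.Chars.strip (full.take i)), String.ofList (PySem.Chars.strip (full.drop i)))
  | none => (query_str, "")

-- ===== PRECONDITION & SPEC =====
def Spec_split_query_on_from (query_str : String) (out : String × String) : Prop := out = split_query_on_from_alt query_str
instance (query_str : String) (out : String × String) : Decidable (Spec_split_query_on_from query_str out) := by unfold Spec_split_query_on_from; infer_instance

-- ===== CLAIM (what is proved, stated in full; the proofs are below) =====
def Claim_equal_split_query_on_from : Prop := ∀ (query_str : String), Dom_split_query_on_from query_str → Spec_split_query_on_from query_str (split_query_on_from query_str)

-- ===== LEMMAS AND PROOFS =====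

-- state after scanning the prefix of length i
def pvS (full : List Char) (i : Nat) : Int × Int × Int × Bool × Bool × Bool :=
  (full.take i).foldl pvStep (0, 0, 0, false, false, false)

lemma pvS_succ (full : List Char) (i : Nat) (h : i < full.length) :
    pvS full (i+1) = pvStep (pvS full i) full[i] := by
  unfold pvS
  have ht : List.take (i+1) full = List.take i full ++ [full[i]] := by
    rw [List.take_add_one, List.getElem?_eq_getElem h]; rfl
  rw [ht, List.foldl_append]; rfl

lemma pv_find_filter {α : Type} (l : List α) (p q : α → Bool) :
    (l.filter p).find? q = l.find? (fun a => p a && q a) := by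
  induction l with
  | nil => rfl
  | cons a t ih =>
    by_cases hp : p a = true
    · by_cases hq : q a = true
      · simp [hp, hq]
      · simp only [Bool.not_eq_true] at hq
        simp [hp, hq, ih]
    · simp only [Bool.not_eq_true] at hp
      simp [hp, ih]

lemma pv_cand_false {c : Char} (full : List Char) (n i : Nat)
    (hgetD : full.getD i ' ' = c) (hF : PySem.Chars.upperChar c ≠ 'F') :
    pvIsCand full n i = false := by
  unfold pvIsCand
  rw [hgetD]
  simp [hF]

-- the main bridge: A's fused scan equals "first candidate with clean prefix" from position i on
lemma pvGoA_eq (q : String) (full : List Char) :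
    ∀ (k i : Nat) (p bk br : Int) (sq dq esc : Bool),
      i + k = full.length →
      pvS full i = (p, bk, br, sq, dq, esc) →
      pvGoA q full (full.drop i) i p bk br sq dq esc =
        (match (List.range' i k).find?
            (fun j => pvIsCand full full.length j && pvPrefixClean (full.take j)) with
          | some j => (String.ofList (PySem.Chars.strip (full.take j)),
                       String.ofList (PySem.Chars.strip (full.drop j)))
          | none => (q, "")) := by
  intro k
  induction k with
  | zero =>
    intro i p bk br sq dq esc hlen _
    have : full.drop i = [] := List.drop_of_length_le (by omega)
    simp [this, pvGoA, List.range']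
  | succ k ih =>
    intro i p bk br sq dq esc hlen hS
    have hi : i < full.length := by omega
    have hdrop : full.drop i = full[i] :: full.drop (i+1) := List.drop_eq_getElem_cons hi
    have hgetD : full.getD i ' ' = full[i] := List.getD_eq_getElem full ' ' hi
    have hopt : full[i]? = some full[i] := List.getElem?_eq_getElem hi
    have hstep := pvS_succ full i hi
    rw [hS] at hstep
    have hrange : List.range' i (k+1) =
        i :: List.range' (i+1) k := by rw [List.range'_succ]
    rw [hdrop, hrange, List.find?_cons]
    set c := full[i] with hc
    have hclean : pvPrefixClean (full.take i) =
        (!esc && !sq && !dq && decide (p = 0) && decide (bk = 0) && decide (br = 0)) := by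
      unfold pvS at hS
      simp [pvPrefixClean, hS]
    have hlen' : (i+1) + k = full.length := by omega
    simp only [pvGoA]
    by_cases hesc : esc = true
    · have hpf : (pvIsCand full full.length i && pvPrefixClean (full.take i)) = false := by
        simp [hclean, hesc]
      simp only [hpf, Bool.false_eq_true, if_false]
      rw [if_pos hesc]
      exact ih (i+1) p bk br sq dq false hlen' (by rw [hstep]; simp [pvStep, hesc])
    · have hescF : esc = false := by simpa using hesc
      by_cases hbs : c = '\\'
      · have hcd : pvIsCand full full.length i = false :=
          pv_cand_false full _ i (hgetD.trans hbs) (by decide)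
        simp only [hcd, Bool.false_and, Bool.false_eq_true, if_false]
        rw [if_neg (by simp [hescF]), if_pos hbs]
        exact ih (i+1) p bk br sq dq true hlen'
          (by rw [hstep]; simp [pvStep, hescF, hbs])
      · by_cases hsq : sq = true
        · have hpf : (pvIsCand full full.length i && pvPrefixClean (full.take i)) = false := by
            simp [hclean, hsq]
          simp only [hpf, Bool.false_eq_true, if_false]
          rw [if_neg (by simp [hescF]), if_neg (by simpa using hbs), if_pos hsq]
          refine ih (i+1) p bk br (if c = '\'' then false else sq) dq esc hlen' ?_
          rw [hstep]
          by_cases hq1 : c = '\''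
          · simp [pvStep, hescF, hbs, hsq, hq1]
          · simp [pvStep, hescF, hbs, hsq, hq1]
        · have hsqF : sq = false := by simpa using hsq
          by_cases hdq : dq = true
          · have hpf : (pvIsCand full full.length i && pvPrefixClean (full.take i)) = false := by
              simp [hclean, hdq]
            simp only [hpf, Bool.false_eq_true, if_false]
            rw [if_neg (by simp [hescF]), if_neg (by simpa using hbs), if_neg (by simp [hsqF]),
              if_pos hdq]
            refine ih (i+1) p bk br sq (if c = '"' then false else dq) esc hlen' ?_
            rw [hstep]
            by_cases hq2 : c = '"'
            · simp [pvStep, hescF, hbs, hsqF, hdq, hq2]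
            · simp [pvStep, hescF, hbs, hsqF, hdq, hq2]
          · have hdqF : dq = false := by simpa using hdq
            by_cases hq1 : c = '\''
            · have hcd : pvIsCand full full.length i = false :=
                pv_cand_false full _ i (hgetD.trans hq1) (by decide)
              simp only [hcd, Bool.false_and, Bool.false_eq_true, if_false]
              rw [if_neg (by simp [hescF]), if_neg (by simpa using hbs), if_neg (by simp [hsqF]),
                if_neg (by simp [hdqF]), if_pos hq1]
              exact ih (i+1) p bk br true dq esc hlen'
                (by rw [hstep]; simp [pvStep, hescF, hbs, hsqF, hdqF, hq1])
            · by_cases hq2 : c = '"'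
              · have hcd : pvIsCand full full.length i = false :=
                  pv_cand_false full _ i (hgetD.trans hq2) (by decide)
                simp only [hcd, Bool.false_and, Bool.false_eq_true, if_false]
                rw [if_neg (by simp [hescF]), if_neg (by simpa using hbs), if_neg (by simp [hsqF]),
                  if_neg (by simp [hdqF]), if_neg (by simpa using hq1), if_pos hq2]
                exact ih (i+1) p bk br sq true esc hlen'
                  (by rw [hstep]; simp [pvStep, hescF, hbs, hsqF, hdqF, hq1, hq2])
              · -- the paren/bracket/brace elif chain and the FROM check
                rw [if_neg (by simp [hescF]), if_neg (by simpa using hbs), if_neg (by simp [hsqF]),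
                  if_neg (by simp [hdqF]), if_neg (by simpa using hq1), if_neg (by simpa using hq2)]
                by_cases hP1 : c = '('
                · have hcd : pvIsCand full full.length i = false :=
                    pv_cand_false full _ i (hgetD.trans hP1) (by decide)
                  simp only [hcd, Bool.false_and, Bool.false_eq_true, if_false]
                  have hst : pvStep (p, bk, br, sq, dq, esc) c = (p+1, bk, br, sq, dq, esc) := by
                    simp [pvStep, hescF, hbs, hsqF, hdqF, hq1, hq2, hP1]
                  have hih := ih (i+1) (p+1) bk br sq dq esc hlen' (by rw [hstep, hst])
                  simp only [hP1]
                  rw [if_neg (show ¬(PySem.Chars.upperChar '(' = 'F') from by decide), ite_self]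
                  exact hih
                · by_cases hP2 : c = ')'
                  · have hcd : pvIsCand full full.length i = false :=
                      pv_cand_false full _ i (hgetD.trans hP2) (by decide)
                    simp only [hcd, Bool.false_and, Bool.false_eq_true, if_false]
                    have hst : pvStep (p, bk, br, sq, dq, esc) c = (max 0 (p - 1), bk, br, sq, dq, esc) := by
                      simp [pvStep, hescF, hbs, hsqF, hdqF, hq1, hq2, hP1, hP2]
                    have hih := ih (i+1) (max 0 (p - 1)) bk br sq dq esc hlen' (by rw [hstep, hst])
                    simp only [hP2]
                    rw [if_neg (show ¬(PySem.Chars.upperChar ')' = 'F') from by decide), ite_self]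
                    exact hih
                  ·
                    by_cases hP3 : c = '['
                    · have hcd : pvIsCand full full.length i = false :=
                        pv_cand_false full _ i (hgetD.trans hP3) (by decide)
                      simp only [hcd, Bool.false_and, Bool.false_eq_true, if_false]
                      have hst : pvStep (p, bk, br, sq, dq, esc) c = (p, bk + 1, br, sq, dq, esc) := by
                        simp [pvStep, hescF, hbs, hsqF, hdqF, hq1, hq2, hP1, hP2, hP3]
                      have hih := ih (i+1) p (bk + 1) br sq dq esc hlen' (by rw [hstep, hst])
                      simp only [hP3]
                      rw [if_neg (show ¬(PySem.Chars.upperChar '[' = 'F') from by decide), ite_self]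
                      exact hih
                    ·
                      by_cases hP4 : c = ']'
                      · have hcd : pvIsCand full full.length i = false :=
                          pv_cand_false full _ i (hgetD.trans hP4) (by decide)
                        simp only [hcd, Bool.false_and, Bool.false_eq_true, if_false]
                        have hst : pvStep (p, bk, br, sq, dq, esc) c = (p, max 0 (bk - 1), br, sq, dq, esc) := by
                          simp [pvStep, hescF, hbs, hsqF, hdqF, hq1, hq2, hP1, hP2, hP3, hP4]
                        have hih := ih (i+1) p (max 0 (bk - 1)) br sq dq esc hlen' (by rw [hstep, hst])
                        simp only [hP4]
                        rw [if_neg (show ¬(PySem.Chars.upperChar ']' = 'F') from by decide), ite_self]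
                        exact hih
                      ·
                        by_cases hP5 : c = '{'
                        · have hcd : pvIsCand full full.length i = false :=
                            pv_cand_false full _ i (hgetD.trans hP5) (by decide)
                          simp only [hcd, Bool.false_and, Bool.false_eq_true, if_false]
                          have hst : pvStep (p, bk, br, sq, dq, esc) c = (p, bk, br + 1, sq, dq, esc) := by
                            simp [pvStep, hescF, hbs, hsqF, hdqF, hq1, hq2, hP1, hP2, hP3, hP4, hP5]
                          have hih := ih (i+1) p bk (br + 1) sq dq esc hlen' (by rw [hstep, hst])
                          simp only [hP5]
                          rw [if_neg (show ¬(PySem.Chars.upperChar '{' = 'F') from by decide), ite_self]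
                          exact hih
                        ·
                          by_cases hP6 : c = '}'
                          · have hcd : pvIsCand full full.length i = false :=
                              pv_cand_false full _ i (hgetD.trans hP6) (by decide)
                            simp only [hcd, Bool.false_and, Bool.false_eq_true, if_false]
                            have hst : pvStep (p, bk, br, sq, dq, esc) c = (p, bk, max 0 (br - 1), sq, dq, esc) := by
                              simp [pvStep, hescF, hbs, hsqF, hdqF, hq1, hq2, hP1, hP2, hP3, hP4, hP5, hP6]
                            have hih := ih (i+1) p bk (max 0 (br - 1)) sq dq esc hlen' (by rw [hstep, hst])
                            simp only [hP6]
                            rw [if_neg (show ¬(PySem.Chars.upperChar '}' = 'F') from by decide), ite_self]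
                            exact hih
                          ·
                            -- c is none of the special characters
                            have hst : pvStep (p, bk, br, sq, dq, esc) c = (p, bk, br, sq, dq, esc) := by
                              simp [pvStep, hescF, hbs, hsqF, hdqF, hq1, hq2, hP1, hP2, hP3, hP4, hP5, hP6]
                            have hih := ih (i+1) p bk br sq dq esc hlen' (by rw [hstep, hst])
                            rw [if_neg hP1, if_neg hP2, if_neg hP3, if_neg hP4, if_neg hP5, if_neg hP6]
                            simp only [Prod.fst, Prod.snd]
                            by_cases hL : p = 0 ∧ bk = 0 ∧ br = 0
                            · by_cases hF : PySem.Chars.upperChar c = 'F'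
                              · by_cases hB : i = 0 ∨ PySem.Chars.isspace (full.getD (i-1) ' ') = true ∨ [')', ']', '}'].contains (full.getD (i-1) ' ') = true
                                · by_cases hM : PySem.Chars.upper ((full.drop i).take 4) = "FROM".toList
                                  · by_cases hA : i + 4 ≥ full.length ∨ PySem.Chars.isspace (full.getD (i+4) ' ') = true ∨ full.getD (i+4) ' ' = '('
                                    · have hpt : (pvIsCand full full.length i && pvPrefixClean (full.take i)) = true := by
                                        unfold pvIsCand
                                        rw [hgetD, hclean]
                                        simp only [Bool.and_eq_true, Bool.or_eq_true, decide_eq_true_eq]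
                                        refine ⟨⟨⟨⟨hF, hM⟩, by tauto⟩, by tauto⟩, ?_⟩
                                        simp [hescF, hsqF, hdqF, hL.1, hL.2.1, hL.2.2]
                                      simp only [hpt]
                                      rw [if_pos hL, if_pos hF, if_pos hB, if_pos hM, if_pos hA]
                                    · have h4 : (decide (i + 4 ≥ full.length) || PySem.Chars.isspace (full.getD (i+4) ' ') || decide (full.getD (i+4) ' ' = '(')) = false := by
                                        rw [Bool.eq_false_iff]
                                        simp only [ne_eq, Bool.or_eq_true, decide_eq_true_eq]
                                        tauto
                                      have hpf : (pvIsCand full full.length i && pvPrefixClean (full.take i)) = false := by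
                                        unfold pvIsCand
                                        rw [h4]
                                        simp
                                      simp only [hpf]
                                      rw [if_pos hL, if_pos hF, if_pos hB, if_pos hM, if_neg hA]
                                      exact hih
                                  · have h2 : (decide (PySem.Chars.upper ((full.drop i).take 4) = "FROM".toList)) = false := decide_eq_false hM
                                    have hpf : (pvIsCand full full.length i && pvPrefixClean (full.take i)) = false := by
                                      unfold pvIsCand
                                      rw [h2]
                                      simp
                                    simp only [hpf]
                                    rw [if_pos hL, if_pos hF, if_pos hB, if_neg hM]
                                    exact hih
                                · have h3 : (decide (i = 0) || PySem.Chars.isspace (full.getD (i-1) ' ') || [')', ']', '}'].contains (full.getD (i-1) ' ')) = false := by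
                                    rw [Bool.eq_false_iff]
                                    simp only [ne_eq, Bool.or_eq_true, decide_eq_true_eq]
                                    tauto
                                  have hpf : (pvIsCand full full.length i && pvPrefixClean (full.take i)) = false := by
                                    unfold pvIsCand
                                    rw [h3]
                                    simp
                                  simp only [hpf]
                                  rw [if_pos hL, if_pos hF, if_neg hB]
                                  exact hih
                              · have h0 : (decide (PySem.Chars.upperChar (full.getD i ' ') = 'F')) = false :=
                                  decide_eq_false (by rw [hgetD]; exact hF)
                                have hpf : (pvIsCand full full.length i && pvPrefixClean (full.take i)) = false := by
                                  unfold pvIsCand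
                                  rw [h0]
                                  simp
                                simp only [hpf]
                                rw [if_pos hL, if_neg hF]
                                exact hih
                            · have hpf : (pvIsCand full full.length i && pvPrefixClean (full.take i)) = false := by
                                rw [hclean]
                                simp only [hescF, hsqF, hdqF, Bool.not_false, Bool.true_and]
                                rw [Bool.eq_false_iff]
                                simp only [ne_eq, Bool.and_eq_true, decide_eq_true_eq]
                                tauto
                              simp only [hpf]
                              rw [if_neg hL]
                              exact hih

-- ===== VERDICT (by name: the statement is the Claim_ definition above) =====
theorem split_query_on_from_spec : Claim_equal_split_query_on_from := by
  intro q _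
  unfold Spec_split_query_on_from split_query_on_from split_query_on_from_alt
  have h := pvGoA_eq q q.toList q.toList.length 0 0 0 0 false false false (by omega) rfl
  simp only [List.drop_zero] at h
  rw [h]
  simp only [pv_find_filter, List.range_eq_range']
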